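-- pv_equiv track=rewrite | github.com/DiegoNavarroNavas/pii-masker | pii_masker_local.py | build_all_span_candidates
-- ===== SOURCE A (Python) =====
-- def is_valid_token(offset_pair: tuple[int, int]) -> bool:
--     start, end = offset_pair
--     return not (start == 0 and end == 0)
--
-- def build_all_span_candidates(offsets: list[tuple[int, int]], max_span_len: int) -> list[list[int]]:
--     valid_idxs = [i for i, off in enumerate(offsets) if is_valid_token(off)]
--     candidates: list[list[int]] = []
--     for start in valid_idxs:
--         max_end = min(start + max_span_len, len(offsets))
--         for end in range(start, max_end):
--             if not is_valid_token(offsets[end]):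
--                 break
--             candidates.append([start, end])
--     return candidates
-- ===== SOURCE B (Python) =====
-- def is_valid_token(offset_pair):
--     start, end = offset_pair
--     return not (start == 0 and end == 0)
--
-- def build_all_span_candidates(offsets, max_span_len):
--     # Partition indices into maximal runs of consecutive valid tokens, then
--     # enumerate spans inside each run; no per-span validity re-check needed.
--     runs = []
--     run_start = None
--     for i, off in enumerate(offsets):
--         if is_valid_token(off):
--             if run_start is None:
--                 run_start = i
--         else:
--             if run_start is not None:
--                 runs.append((run_start, i - 1))
--                 run_start = None
--     if run_start is not None:
--         runs.append((run_start, len(offsets) - 1))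
--     candidates = []
--     for lo, hi in runs:
--         for start in range(lo, hi + 1):
--             for end in range(start, min(start + max_span_len - 1, hi) + 1):
--                 candidates.append([start, end])
--     return candidates
-- ===== Notes on version B (the rewrite author's own statement) =====
-- stated objective: alternative
-- what changed: A filters valid indices and then, for every start, re-scans forward with a break testing each token again; B makes one pass that partitions the indices into maximal runs of consecutive valid tokens and then emits all spans inside each run by pure index arithmetic, with no per-span validity re-check.
import Mathlib
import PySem

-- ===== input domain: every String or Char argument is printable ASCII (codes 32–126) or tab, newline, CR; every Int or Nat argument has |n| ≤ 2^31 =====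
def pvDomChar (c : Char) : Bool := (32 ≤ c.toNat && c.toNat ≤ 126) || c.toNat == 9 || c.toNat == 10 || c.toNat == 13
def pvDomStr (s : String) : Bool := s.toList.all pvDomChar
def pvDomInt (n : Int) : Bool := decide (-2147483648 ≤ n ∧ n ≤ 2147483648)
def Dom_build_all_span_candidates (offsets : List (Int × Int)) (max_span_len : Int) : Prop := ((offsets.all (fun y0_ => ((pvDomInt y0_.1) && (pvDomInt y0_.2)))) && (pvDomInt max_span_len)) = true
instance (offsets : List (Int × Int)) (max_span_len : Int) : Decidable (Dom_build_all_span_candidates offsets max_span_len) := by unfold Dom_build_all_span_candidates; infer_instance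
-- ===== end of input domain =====

-- B replaces A's per-start forward re-scan (with break) by a one-pass partition of the
-- indices into maximal runs of valid tokens followed by direct span enumeration inside
-- each run (objective: alternative decomposition; return value proved identical).

-- ===== PORT A =====
def is_valid_token (offset_pair : Int × Int) : Bool :=
  !(offset_pair.1 == 0 && offset_pair.2 == 0)

-- inner 'for end in range(start, max_end)' loop with its break
def pvAInner (offsets : List (Int × Int)) (start : Int) :
    List Int → List (List Int) → List (List Int)
  | [], acc => acc
  | e :: rest, acc =>
    -- offsets[end]: the index is always in range here, so pyGetD is exact
    if is_valid_token (PySem.List.pyGetD offsets e (0, 0)) then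
      pvAInner offsets start rest (acc ++ [[start, e]])
    else acc

def build_all_span_candidates (offsets : List (Int × Int)) (max_span_len : Int) : List (List Int) :=
  let valid_idxs : List Int :=
    (PySem.List.enumerate offsets 0).foldl
      (fun acc p => if is_valid_token p.2 then acc ++ [p.1] else acc) []
  valid_idxs.foldl
    (fun acc start =>
      let max_end := min (start + max_span_len) (PySem.List.len offsets)
      pvAInner offsets start (PySem.List.pyRange start max_end 1) acc) []

-- ===== PORT B =====
-- one step of B's run-collecting scan: state = (closed runs, open-run start)
def pvStepB (st : List (Int × Int) × Option Int) (p : Int × (Int × Int)) :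
    List (Int × Int) × Option Int :=
  if is_valid_token p.2 then
    match st.2 with
    | none => (st.1, some p.1)
    | some _ => st
  else
    match st.2 with
    | some lo => (st.1 ++ [(lo, p.1 - 1)], none)
    | none => st

def build_all_span_candidates_alt (offsets : List (Int × Int)) (max_span_len : Int) : List (List Int) :=
  let st := (PySem.List.enumerate offsets 0).foldl pvStepB ([], none)
  let runs : List (Int × Int) :=
    match st.2 with
    | some lo => st.1 ++ [(lo, PySem.List.len offsets - 1)]
    | none => st.1
  runs.foldl
    (fun acc r =>
      (PySem.List.pyRange r.1 (r.2 + 1) 1).foldl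
        (fun acc2 s =>
          (PySem.List.pyRange s (min (s + max_span_len - 1) r.2 + 1) 1).foldl
            (fun acc3 e => acc3 ++ [[s, e]]) acc2)
        acc)
    []

-- ===== PRECONDITION & SPEC =====
def Spec_build_all_span_candidates (offsets : List (Int × Int)) (max_span_len : Int) (out : List (List Int)) : Prop := out = build_all_span_candidates_alt offsets max_span_len
instance (offsets : List (Int × Int)) (max_span_len : Int) (out : List (List Int)) : Decidable (Spec_build_all_span_candidates offsets max_span_len out) := by unfold Spec_build_all_span_candidates; infer_instance

-- ===== CLAIM (what is proved, stated in full; the proofs are below) =====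
def Claim_equal_build_all_span_candidates : Prop := ∀ (offsets : List (Int × Int)) (max_span_len : Int), Dom_build_all_span_candidates offsets max_span_len → Spec_build_all_span_candidates offsets max_span_len (build_all_span_candidates offsets max_span_len)

-- ===== LEMMAS AND PROOFS =====

-- predicate 'token at index j is valid', exactly as A's inner loop tests it
def pvP (offsets : List (Int × Int)) (j : Int) : Bool :=
  is_valid_token (PySem.List.pyGetD offsets j (0, 0))

-- runs of consecutive valid indices of l (indices starting at i), with an
-- optionally open run started at lo; reference recursion for B's scan
def pvRunsFrom : List (Int × Int) → Int → Option Int → List (Int × Int)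
  | [], _, none => []
  | [], i, some lo => [(lo, i - 1)]
  | x :: xs, i, lo? =>
    if is_valid_token x then
      pvRunsFrom xs (i + 1) (some (lo?.getD i))
    else
      match lo? with
      | some lo => (lo, i - 1) :: pvRunsFrom xs (i + 1) none
      | none => pvRunsFrom xs (i + 1) none

-- closed runs plus final open-run state, same recursion as B's foldl
def pvScan : List (Int × Int) → Int → Option Int → List (Int × Int) × Option Int
  | [], _, lo? => ([], lo?)
  | x :: xs, i, lo? =>
    if is_valid_token x then pvScan xs (i + 1) (some (lo?.getD i))
    else
      match lo? with
      | some lo => ((lo, i - 1) :: (pvScan xs (i + 1) none).1, (pvScan xs (i + 1) none).2)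
      | none => pvScan xs (i + 1) none

lemma pvP_lt (offsets : List (Int × Int)) (j : Int) (_h0 : 0 ≤ j)
    (h : pvP offsets j = true) : j < (offsets.length : Int) := by
  by_contra hc
  have hnone : PySem.List.pyGet? offsets j = none := by
    rw [PySem.List.pyGet?_eq_none_iff]
    simp [PySem.Raise.InRange]
    omega
  have : PySem.List.pyGetD offsets j (0, 0) = (0, 0) := by
    simp [PySem.List.pyGetD, hnone]
  simp [pvP, this, is_valid_token] at h

lemma pvP_at (offsets : List (Int × Int)) (k : Nat) (hk : k < offsets.length) :
    pvP offsets (k : Int) = is_valid_token offsets[k] := by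
  simp [pvP, PySem.List.pyGetD_natCast, List.getD_eq_getElem?_getD, hk]

lemma pvAInner_eq (offsets : List (Int × Int)) (s : Int) :
    ∀ (idxs : List Int) (acc : List (List Int)),
      pvAInner offsets s idxs acc
        = acc ++ (idxs.takeWhile (pvP offsets)).map (fun e => [s, e]) := by
  intro idxs
  induction idxs with
  | nil => intro acc; simp [pvAInner]
  | cons e rest ih =>
    intro acc
    by_cases h : pvP offsets e = true
    · have h' : is_valid_token (PySem.List.pyGetD offsets e (0, 0)) = true := h
      simp [pvAInner, h', h, ih]
    · have h' : is_valid_token (PySem.List.pyGetD offsets e (0, 0)) = false := by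
        simpa [pvP] using h
      simp [pvAInner, pvP, h']

theorem pvTakeWhile_pyRange (P : Int → Bool) (a b c : Int) (hac : a ≤ c)
    (hv : ∀ i, a ≤ i → i < c → P i = true) (hs : c < b → P c = false) :
    (PySem.List.pyRange a b 1).takeWhile P = PySem.List.pyRange a (min b c) 1 := by
  by_cases hba : b ≤ a
  · rw [PySem.List.pyRange_one_eq_nil hba, PySem.List.pyRange_one_eq_nil (by omega)]
    simp
  · have hab : a < b := by omega
    rw [PySem.List.pyRange_one_cons hab]
    by_cases hlt : a < c
    · rw [List.takeWhile_cons_of_pos (hv a le_rfl hlt),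
        pvTakeWhile_pyRange P (a + 1) b c (by omega)
          (fun i h1 h2 => hv i (by omega) h2) hs,
        show PySem.List.pyRange a (min b c) 1 = a :: PySem.List.pyRange (a + 1) (min b c) 1
          from PySem.List.pyRange_one_cons (lt_min hab hlt)]
    · have heq : a = c := by omega
      have hPc : P a = false := by
        have := hs (by omega)
        rwa [← heq] at this
      rw [List.takeWhile_cons_of_neg (by simp [hPc])]
      have hmin : min b c = a := by omega
      rw [hmin, PySem.List.pyRange_one_eq_nil le_rfl]
termination_by (b - a).toNat
decreasing_by omega

-- A's valid_idxs comprehension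
lemma pvFoldVI : ∀ (ps : List (Int × (Int × Int))) (acc : List Int),
    ps.foldl (fun acc p => if is_valid_token p.2 then acc ++ [p.1] else acc) acc
      = acc ++ (ps.filter (fun p => is_valid_token p.2)).map (fun p => p.1) := by
  intro ps
  induction ps with
  | nil => intro acc; simp
  | cons p rest ih =>
    intro acc
    by_cases h : is_valid_token p.2 = true <;> simp [h, ih]

lemma pvValidIdxs_eq (offsets : List (Int × Int)) :
    (PySem.List.enumerate offsets 0).foldl
      (fun acc p => if is_valid_token p.2 then acc ++ [p.1] else acc) []
      = (PySem.List.pyRange 0 (offsets.length : Int) 1).filter (pvP offsets) := by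
  rw [pvFoldVI, PySem.List.enumerate_eq_map_pyRange (d := ((0, 0) : Int × Int)),
    List.filter_map, List.map_map]
  simp only [Function.comp_def, List.nil_append, List.map_id']
  rfl

-- A's outer loop
lemma pvFoldA (offsets : List (Int × Int)) (m : Int) :
    ∀ (vs : List Int) (acc : List (List Int)),
      vs.foldl (fun acc start =>
          pvAInner offsets start
            (PySem.List.pyRange start (min (start + m) (offsets.length : Int)) 1) acc) acc
        = acc ++ vs.flatMap (fun s =>
            ((PySem.List.pyRange s (min (s + m) (offsets.length : Int)) 1).takeWhile
              (pvP offsets)).map (fun e => [s, e])) := by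
  intro vs
  induction vs with
  | nil => intro acc; simp
  | cons v rest ih =>
    intro acc
    simp only [List.foldl_cons]
    rw [pvAInner_eq, ih, List.flatMap_cons, List.append_assoc]

-- B's three nested emission loops
lemma pvFoldInner (s : Int) : ∀ (es : List Int) (acc : List (List Int)),
    es.foldl (fun acc3 e => acc3 ++ [[s, e]]) acc = acc ++ es.map (fun e => [s, e]) := by
  intro es
  induction es with
  | nil => intro acc; simp
  | cons e rest ih => intro acc; simp [ih]

lemma pvFoldMid (m : Int) (r : Int × Int) :
    ∀ (ss : List Int) (acc : List (List Int)),
      ss.foldl (fun acc2 s =>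
          (PySem.List.pyRange s (min (s + m - 1) r.2 + 1) 1).foldl
            (fun acc3 e => acc3 ++ [[s, e]]) acc2) acc
        = acc ++ ss.flatMap (fun s =>
            (PySem.List.pyRange s (min (s + m - 1) r.2 + 1) 1).map (fun e => [s, e])) := by
  intro ss
  induction ss with
  | nil => intro acc; simp
  | cons s rest ih =>
    intro acc
    simp only [List.foldl_cons]
    rw [pvFoldInner, ih, List.flatMap_cons, List.append_assoc]

lemma pvFoldOuter (m : Int) :
    ∀ (rs : List (Int × Int)) (acc : List (List Int)),
      rs.foldl (fun acc r =>
          (PySem.List.pyRange r.1 (r.2 + 1) 1).foldl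
            (fun acc2 s =>
              (PySem.List.pyRange s (min (s + m - 1) r.2 + 1) 1).foldl
                (fun acc3 e => acc3 ++ [[s, e]]) acc2) acc) acc
        = acc ++ rs.flatMap (fun r =>
            (PySem.List.pyRange r.1 (r.2 + 1) 1).flatMap (fun s =>
              (PySem.List.pyRange s (min (s + m - 1) r.2 + 1) 1).map (fun e => [s, e]))) := by
  intro rs
  induction rs with
  | nil => intro acc; simp
  | cons r rest ih =>
    intro acc
    simp only [List.foldl_cons]
    rw [pvFoldMid, ih, List.flatMap_cons, List.append_assoc]

-- B's state fold computes pvScan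
lemma pvFoldB_eq : ∀ (l : List (Int × Int)) (i : Int)
    (rs : List (Int × Int)) (lo? : Option Int),
    (PySem.List.enumerate l i).foldl pvStepB (rs, lo?)
      = (rs ++ (pvScan l i lo?).1, (pvScan l i lo?).2) := by
  intro l
  induction l with
  | nil => intro i rs lo?; simp [pvScan, PySem.List.enumerate_nil]
  | cons x xs ih =>
    intro i rs lo?
    rw [PySem.List.enumerate_cons, List.foldl_cons]
    by_cases h : is_valid_token x = true
    · cases lo? with
      | none => simp [pvStepB, h, pvScan, ih]
      | some lo => simp [pvStepB, h, pvScan, ih]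
    · cases lo? with
      | none => simp [pvStepB, h, pvScan, ih]
      | some lo => simp [pvStepB, h, pvScan, ih]

lemma pvRunsFrom_scan : ∀ (l : List (Int × Int)) (i : Int) (lo? : Option Int),
    pvRunsFrom l i lo?
      = (pvScan l i lo?).1 ++
        (match (pvScan l i lo?).2 with
         | some lo => [(lo, i + (l.length : Int) - 1)]
         | none => []) := by
  intro l
  induction l with
  | nil =>
    intro i lo?
    cases lo? <;> simp [pvRunsFrom, pvScan]
  | cons x xs ih =>
    intro i lo?
    by_cases h : is_valid_token x = true
    · rw [show pvRunsFrom (x :: xs) i lo? = pvRunsFrom xs (i + 1) (some (lo?.getD i)) by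
          simp [pvRunsFrom, h],
        show pvScan (x :: xs) i lo? = pvScan xs (i + 1) (some (lo?.getD i)) by
          simp [pvScan, h],
        ih]
      cases hsc : (pvScan xs (i + 1) (some (lo?.getD i))).2 with
      | none => simp
      | some lo => simp [List.length_cons]; omega
    · cases lo? with
      | none =>
        rw [show pvRunsFrom (x :: xs) i none = pvRunsFrom xs (i + 1) none by
            simp [pvRunsFrom, h],
          show pvScan (x :: xs) i none = pvScan xs (i + 1) none by
            simp [pvScan, h],
          ih]
        cases hsc : (pvScan xs (i + 1) none).2 with
        | none => simp
        | some lo => simp [List.length_cons]; omega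
      | some lo =>
        rw [show pvRunsFrom (x :: xs) i (some lo) = (lo, i - 1) :: pvRunsFrom xs (i + 1) none by
            simp [pvRunsFrom, h],
          show pvScan (x :: xs) i (some lo)
              = ((lo, i - 1) :: (pvScan xs (i + 1) none).1, (pvScan xs (i + 1) none).2) by
            simp [pvScan, h],
          ih]
        cases hsc : (pvScan xs (i + 1) none).2 with
        | none => simp
        | some lo2 => simp [List.length_cons]; omega

-- flattening the runs recovers exactly the valid indices, in order
lemma pvRuns_flat (offsets : List (Int × Int)) :
    ∀ (l : List (Int × Int)) (k : Nat) (lo? : Option Int),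
      offsets.drop k = l →
      (∀ lo, lo? = some lo → 0 ≤ lo ∧ lo ≤ (k : Int)) →
      (pvRunsFrom l (k : Int) lo?).flatMap (fun r => PySem.List.pyRange r.1 (r.2 + 1) 1)
        = (match lo? with
           | some lo => PySem.List.pyRange lo (k : Int) 1
           | none => [])
          ++ (PySem.List.pyRange (k : Int) (offsets.length : Int) 1).filter (pvP offsets) := by
  intro l
  induction l with
  | nil =>
    intro k lo? hdrop hinv
    have hlen : offsets.length ≤ k := by
      have := congrArg List.length hdrop
      simp [List.length_drop] at this
      omega
    rw [PySem.List.pyRange_one_eq_nil (by exact_mod_cast Int.ofNat_le.mpr hlen)]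
    cases lo? with
    | none => simp [pvRunsFrom]
    | some lo =>
      simp only [pvRunsFrom, List.flatMap_cons, List.flatMap_nil, List.append_nil]
      rw [show (k : Int) - 1 + 1 = (k : Int) by ring]
      simp
  | cons x xs ih =>
    intro k lo? hdrop hinv
    have hk : k < offsets.length := by
      by_contra hc
      rw [List.drop_eq_nil_of_le (by omega)] at hdrop
      exact (List.cons_ne_nil x xs) hdrop.symm
    have hx : offsets[k] = x := by
      have h0 : (offsets.drop k)[0]? = some x := by rw [hdrop]; rfl
      rw [List.getElem?_drop, Nat.add_zero, List.getElem?_eq_getElem hk] at h0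
      exact Option.some.inj h0
    have hdrop' : offsets.drop (k + 1) = xs := by
      rw [← List.drop_drop, hdrop]
      simp
    have hPk : pvP offsets (k : Int) = is_valid_token x := by
      rw [pvP_at offsets k hk, hx]
    have hsplit : PySem.List.pyRange (k : Int) (offsets.length : Int) 1
        = (k : Int) :: PySem.List.pyRange ((k : Int) + 1) (offsets.length : Int) 1 :=
      PySem.List.pyRange_one_cons (by exact_mod_cast hk)
    by_cases h : is_valid_token x = true
    · cases lo? with
      | none =>
        have ihh := ih (k + 1) (some (k : Int)) (by rw [← hdrop'])
          (by intro lo' hlo'; simp at hlo'; subst hlo'; constructor <;> push_cast <;> omega)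
        simp only [pvRunsFrom, h, if_true, Option.getD_none]
        rw [show ((k : Int) + 1) = ((k + 1 : Nat) : Int) by push_cast; ring] at *
        rw [ihh]
        simp only [hsplit, List.filter_cons, hPk, h]
        rw [PySem.List.pyRange_one_cons (by push_cast; omega),
          PySem.List.pyRange_one_eq_nil (by push_cast; omega)]
        simp
      | some lo =>
        obtain ⟨hlo0, hlok⟩ := hinv lo rfl
        have ihh := ih (k + 1) (some lo) (by rw [← hdrop'])
          (by intro lo' hlo'; simp at hlo'; subst hlo'; constructor <;> push_cast <;> omega)
        simp only [pvRunsFrom, h, if_true, Option.getD_some]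
        rw [show ((k : Int) + 1) = ((k + 1 : Nat) : Int) by push_cast; ring] at *
        rw [ihh]
        simp only [hsplit, List.filter_cons, hPk, h]
        rw [show ((k + 1 : Nat) : Int) = (k : Int) + 1 by push_cast; ring,
          PySem.List.pyRange_one_succ_right hlok]
        simp
    · have ihh := ih (k + 1) none (by rw [← hdrop']) (by simp)
      cases lo? with
      | none =>
        simp only [pvRunsFrom, h, if_false, Bool.false_eq_true]
        rw [show ((k : Int) + 1) = ((k + 1 : Nat) : Int) by push_cast; ring] at *
        rw [ihh]
        simp only [hsplit, List.filter_cons, hPk, h]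
        simp
      | some lo =>
        obtain ⟨hlo0, hlok⟩ := hinv lo rfl
        simp only [pvRunsFrom, h, if_false, Bool.false_eq_true]
        rw [show ((k : Int) + 1) = ((k + 1 : Nat) : Int) by push_cast; ring] at *
        simp only [List.flatMap_cons, ihh]
        simp only [hsplit, List.filter_cons, hPk, h]
        have : (k : Int) - 1 + 1 = (k : Int) := by ring
        rw [this]
        simp

-- every produced run is in range, nonempty, all-valid, and right-maximal
lemma pvRuns_facts (offsets : List (Int × Int)) :
    ∀ (l : List (Int × Int)) (k : Nat) (lo? : Option Int),
      offsets.drop k = l →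
      (∀ lo, lo? = some lo → 0 ≤ lo ∧ lo < (k : Int) ∧
        ∀ j : Int, lo ≤ j → j < (k : Int) → pvP offsets j = true) →
      ∀ r ∈ pvRunsFrom l (k : Int) lo?,
        0 ≤ r.1 ∧ r.1 ≤ r.2 ∧ r.2 + 1 ≤ (offsets.length : Int)
        ∧ (∀ j : Int, r.1 ≤ j → j ≤ r.2 → pvP offsets j = true)
        ∧ (r.2 + 1 < (offsets.length : Int) → pvP offsets (r.2 + 1) = false) := by
  intro l
  induction l with
  | nil =>
    intro k lo? hdrop hinv r hr
    have hlen : offsets.length ≤ k := by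
      have := congrArg List.length hdrop
      simp [List.length_drop] at this
      omega
    cases lo? with
    | none => simp [pvRunsFrom] at hr
    | some lo =>
      simp [pvRunsFrom] at hr
      obtain ⟨hlo0, hlok, hval⟩ := hinv lo rfl
      subst hr
      have hPk1 : pvP offsets ((k : Int) - 1) = true := hval _ (by omega) (by omega)
      have hk1 : (k : Int) - 1 < (offsets.length : Int) :=
        pvP_lt offsets _ (by omega) hPk1
      refine ⟨hlo0, by omega, by omega, ?_, ?_⟩
      · intro j h1 h2; exact hval j h1 (by omega)
      · intro hcon
        exfalso
        have : (offsets.length : Int) ≤ (k : Int) := by exact_mod_cast hlen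
        omega
  | cons x xs ih =>
    intro k lo? hdrop hinv r hr
    have hk : k < offsets.length := by
      by_contra hc
      rw [List.drop_eq_nil_of_le (by omega)] at hdrop
      exact (List.cons_ne_nil x xs) hdrop.symm
    have hx : offsets[k] = x := by
      have h0 : (offsets.drop k)[0]? = some x := by rw [hdrop]; rfl
      rw [List.getElem?_drop, Nat.add_zero, List.getElem?_eq_getElem hk] at h0
      exact Option.some.inj h0
    have hdrop' : offsets.drop (k + 1) = xs := by
      rw [← List.drop_drop, hdrop]
      simp
    have hPk : pvP offsets (k : Int) = is_valid_token x := by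
      rw [pvP_at offsets k hk, hx]
    by_cases h : is_valid_token x = true
    · simp only [pvRunsFrom, h, if_true] at hr
      rw [show ((k : Int) + 1) = ((k + 1 : Nat) : Int) by push_cast; ring] at hr
      refine ih (k + 1) (some (lo?.getD (k : Int))) (by rw [← hdrop']) ?_ r hr
      intro lo' hlo'
      cases lo? with
      | none =>
        simp at hlo'; subst hlo'
        refine ⟨by positivity, by push_cast; omega, ?_⟩
        intro j h1 h2
        have : j = (k : Int) := by push_cast at h2; omega
        rw [this, hPk, h]
      | some lo =>
        simp at hlo'
        obtain ⟨h1, h2, h3⟩ := hinv lo rfl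
        subst hlo'
        refine ⟨h1, by push_cast; omega, ?_⟩
        intro j hj1 hj2
        push_cast at hj2
        by_cases hjk : j < (k : Int)
        · exact h3 j hj1 hjk
        · have : j = (k : Int) := by omega
          rw [this, hPk, h]
    · cases lo? with
      | none =>
        simp only [pvRunsFrom, h, if_false, Bool.false_eq_true] at hr
        rw [show ((k : Int) + 1) = ((k + 1 : Nat) : Int) by push_cast; ring] at hr
        exact ih (k + 1) none (by rw [← hdrop']) (by simp) r hr
      | some lo =>
        simp only [pvRunsFrom, h, if_false, Bool.false_eq_true, List.mem_cons] at hr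
        rcases hr with hr | hr
        · obtain ⟨h1, h2, h3⟩ := hinv lo rfl
          subst hr
          refine ⟨h1, by omega, by push_cast; omega, ?_, ?_⟩
          · intro j hj1 hj2; exact h3 j hj1 (by omega)
          · intro _
            have : (k : Int) - 1 + 1 = (k : Int) := by ring
            rw [this, hPk]
            simpa using h
        · rw [show ((k : Int) + 1) = ((k + 1 : Nat) : Int) by push_cast; ring] at hr
          exact ih (k + 1) none (by rw [← hdrop']) (by simp) r hr

lemma pvFlatMap_congr {α β : Type} {l : List α} {f g : α → List β}
    (h : ∀ a ∈ l, f a = g a) : l.flatMap f = l.flatMap g := by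
  induction l with
  | nil => rfl
  | cons a rest ih =>
    simp only [List.flatMap_cons]
    rw [h a (by simp), ih (fun a' ha' => h a' (by simp [ha']))]

-- ===== VERDICT (by name: the statement is the Claim_ definition above) =====
theorem build_all_span_candidates_spec : Claim_equal_build_all_span_candidates := by
  intro offsets m _
  unfold Spec_build_all_span_candidates build_all_span_candidates build_all_span_candidates_alt
  simp only [PySem.List.len_eq]
  rw [pvValidIdxs_eq, pvFoldA, pvFoldB_eq, pvFoldOuter]
  simp only [List.nil_append]
  have hruns :
      (match (pvScan offsets 0 none).2 with
        | some lo => (pvScan offsets 0 none).1 ++ [(lo, (offsets.length : Int) - 1)]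
        | none => (pvScan offsets 0 none).1)
      = pvRunsFrom offsets 0 none := by
    rw [pvRunsFrom_scan]
    cases hsc : (pvScan offsets 0 none).2 with
    | none => simp
    | some lo => simp
  rw [hruns]
  have hflat := pvRuns_flat offsets offsets 0 none (by simp) (by simp)
  simp only [Nat.cast_zero, List.nil_append] at hflat
  rw [← hflat, List.flatMap_assoc]
  have hfacts := pvRuns_facts offsets offsets 0 none (by simp) (by simp)
  simp only [Nat.cast_zero] at hfacts
  apply pvFlatMap_congr
  intro r hr
  obtain ⟨h1, h2, h3, h4, h5⟩ := hfacts r hr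
  apply pvFlatMap_congr
  intro s hs
  rw [PySem.List.mem_pyRange_one] at hs
  rw [pvTakeWhile_pyRange (pvP offsets) s (min (s + m) (offsets.length : Int)) (r.2 + 1)
    (by omega) (fun i hi1 hi2 => h4 i (by omega) (by omega))
    (fun hc => h5 (by omega))]
  have : min (min (s + m) (offsets.length : Int)) (r.2 + 1) = min (s + m - 1) r.2 + 1 := by
    omega
  rw [this]
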